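-- pv_equiv track=rewrite | github.com/pedro-com/bioinspired-evo | examples/backpack.py | fit_bounded_knapsack
-- ===== SOURCE A (Python) =====
-- def fit_bounded_knapsack(solution, items, W):
--     total_value = 0
--     total_weight = 0
--     for i, count in enumerate(solution):
--         if count > items[i][2]:  # Check if count exceeds max_count
--             return 0
--         total_value += items[i][0] * count
--         total_weight += items[i][1] * count
--     return -total_value if total_weight <= W else 0
-- ===== SOURCE B (Python) =====
-- def fit_bounded_knapsack(solution, items, W):
--     pairs = list(zip(solution, items))
--
--     def totals(ps):
--         # (value, weight) totals of ps, or None if some count exceeds its max_count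
--         n = len(ps)
--         if n == 0:
--             return (0, 0)
--         if n == 1:
--             count, (value, weight, max_count) = ps[0]
--             if count > max_count:
--                 return None
--             return (value * count, weight * count)
--         mid = n // 2
--         left = totals(ps[:mid])
--         right = totals(ps[mid:])
--         if left is None or right is None:
--             return None
--         return (left[0] + right[0], left[1] + right[1])
--
--     r = totals(pairs)
--     if r is None or r[1] > W:
--         return 0
--     return -r[0]
-- ===== Notes on version B (the rewrite author's own statement) =====
-- stated objective: alternative
-- what changed: Replaces A's fused left-to-right early-exit indexed loop with a divide-and-conquer recursion over the zipped pairs: each half yields None (bound violated) or a (value,weight) total, halves are merged associatively, and the capacity test is applied once at the end.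
import Mathlib
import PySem

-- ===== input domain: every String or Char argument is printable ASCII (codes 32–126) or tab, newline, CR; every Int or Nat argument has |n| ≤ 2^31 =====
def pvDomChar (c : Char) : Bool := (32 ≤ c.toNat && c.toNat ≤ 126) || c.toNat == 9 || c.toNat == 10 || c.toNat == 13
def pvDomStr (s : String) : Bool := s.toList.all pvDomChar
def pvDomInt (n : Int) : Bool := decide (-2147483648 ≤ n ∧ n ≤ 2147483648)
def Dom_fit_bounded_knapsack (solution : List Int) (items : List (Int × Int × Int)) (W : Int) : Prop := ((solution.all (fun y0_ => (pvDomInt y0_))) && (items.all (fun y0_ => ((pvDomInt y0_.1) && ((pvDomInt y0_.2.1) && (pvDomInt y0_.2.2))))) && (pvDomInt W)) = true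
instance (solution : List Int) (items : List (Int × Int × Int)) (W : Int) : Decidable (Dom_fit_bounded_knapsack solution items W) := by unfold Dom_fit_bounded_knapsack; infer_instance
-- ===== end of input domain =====

-- B replaces A's fused early-exit indexed loop with a divide-and-conquer recursion over the zipped pairs (None = bound violation, halves merged associatively); equivalence proved on inputs where A returns (elsewhere A raises IndexError, excluded by Pre_).


-- ===== PORT A =====
-- A's loop: enumerate(solution), index into items (pyGet?; none = IndexError, excluded by Pre_),
-- early return 0 on violation, accumulate total_value/total_weight.
def fitA_loop (items : List (Int × Int × Int)) (W : Int) :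
    List Int → Nat → Int → Int → Int
  | [], _, total_value, total_weight =>
      if total_weight ≤ W then -total_value else 0
  | count :: rest, i, total_value, total_weight =>
      match PySem.List.pyGet? items (i : Int) with
      | none => 0  -- IndexError in Python; outside Pre_
      | some it =>
          if count > it.2.2 then 0
          else fitA_loop items W rest (i + 1)
            (total_value + it.1 * count) (total_weight + it.2.1 * count)

def fit_bounded_knapsack (solution : List Int) (items : List (Int × Int × Int)) (W : Int) : Int :=
  fitA_loop items W solution 0 0 0

-- ===== PORT B =====
-- Source B's `totals`: divide-and-conquer over the pair list; a pair is (count, (value, weight, max_count));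
-- none = some count exceeds its max_count, some (v, w) = totals of the slice.
def fitB_totals : List (Int × Int × Int × Int) → Option (Int × Int)
  | [] => some (0, 0)
  | [p] =>
      if p.1 > p.2.2.2 then none
      else some (p.2.1 * p.1, p.2.2.1 * p.1)
  | a :: b :: rest =>
      -- mid = len(ps) // 2: length is a Nat, so Lean's Nat division is exact here
      match fitB_totals ((a :: b :: rest).take ((a :: b :: rest).length / 2)),
            fitB_totals ((a :: b :: rest).drop ((a :: b :: rest).length / 2)) with
      | some l, some r => some (l.1 + r.1, l.2 + r.2)
      | _, _ => none
termination_by ps => ps.length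
decreasing_by
  · simp only [List.length_take, List.length_cons]; omega
  · simp only [List.length_drop, List.length_cons]; omega

def fit_bounded_knapsack_alt (solution : List Int) (items : List (Int × Int × Int)) (W : Int) : Int :=
  let pairs := solution.zip items
  match fitB_totals pairs with
  | none => 0
  | some r => if r.2 > W then 0 else -r.1

-- ===== PRECONDITION & SPEC =====
-- A raises IndexError iff solution is longer than items AND no count exceeds its item's
-- max_count within the zipped prefix (otherwise A early-returns 0 before the bad index);
-- Pre_ admits exactly the inputs on which A returns.
def Pre_fit_bounded_knapsack (solution : List Int) (items : List (Int × Int × Int)) (W : Int) : Prop :=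
  solution.length ≤ items.length ∨ ((solution.zip items).any (fun p => p.1 > p.2.2.2)) = true
instance (solution : List Int) (items : List (Int × Int × Int)) (W : Int) : Decidable (Pre_fit_bounded_knapsack solution items W) := by unfold Pre_fit_bounded_knapsack; infer_instance
def pvWitness_fit_bounded_knapsack : List Int × (List (Int × Int × Int)) × Int :=
  ([1, 2], [(3, 1, 2), (4, 2, 2)], 10)

def Spec_fit_bounded_knapsack (solution : List Int) (items : List (Int × Int × Int)) (W : Int) (out : Int) : Prop := out = fit_bounded_knapsack_alt solution items W
instance (solution : List Int) (items : List (Int × Int × Int)) (W : Int) (out : Int) : Decidable (Spec_fit_bounded_knapsack solution items W out) := by unfold Spec_fit_bounded_knapsack; infer_instance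

-- ===== CLAIM (what is proved, stated in full; the proofs are below) =====
def Claim_equal_fit_bounded_knapsack : Prop := ∀ (solution : List Int) (items : List (Int × Int × Int)) (W : Int), Dom_fit_bounded_knapsack solution items W → Pre_fit_bounded_knapsack solution items W → Spec_fit_bounded_knapsack solution items W (fit_bounded_knapsack solution items W)
-- ===== LEMMAS AND PROOFS =====
-- Characterisation of B's divide-and-conquer totals: none iff some pair violates its bound,
-- otherwise the two sums; proved by the recursion's own induction principle, splitting the
-- list as take ++ drop.
theorem fitB_totals_spec_aux (n : Nat) :
    ∀ (ps : List (Int × Int × Int × Int)), ps.length ≤ n →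
    fitB_totals ps =
      (if ps.any (fun p => p.1 > p.2.2.2) then none
       else some ((ps.map (fun p => p.2.1 * p.1)).sum, (ps.map (fun p => p.2.2.1 * p.1)).sum)) := by
  induction n with
  | zero =>
      intro ps h
      match ps with
      | [] => simp [fitB_totals]
      | _ :: _ => simp at h
  | succ n ih =>
      intro ps h
      match ps with
      | [] => simp [fitB_totals]
      | [p] => by_cases hp : p.1 > p.2.2.2 <;> simp [fitB_totals, hp]
      | a :: b :: rest =>
        rw [fitB_totals]
        have hlen : (a :: b :: rest).length ≤ n + 1 := h
        simp only [List.length_cons] at hlen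
        have h1 : ((a :: b :: rest).take ((a :: b :: rest).length / 2)).length ≤ n := by
          simp only [List.length_take, List.length_cons]; omega
        have h2 : ((a :: b :: rest).drop ((a :: b :: rest).length / 2)).length ≤ n := by
          simp only [List.length_drop, List.length_cons]; omega
        rw [ih _ h1, ih _ h2]
        have hsplit := List.take_append_drop ((a :: b :: rest).length / 2) (a :: b :: rest)
        have hany : ((a :: b :: rest).any (fun p => decide (p.1 > p.2.2.2)))
            = (((a :: b :: rest).take ((a :: b :: rest).length / 2)).any (fun p => decide (p.1 > p.2.2.2))
               || ((a :: b :: rest).drop ((a :: b :: rest).length / 2)).any (fun p => decide (p.1 > p.2.2.2))) := by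
          conv_lhs => rw [← hsplit]
          rw [List.any_append]
        by_cases hL : ((a :: b :: rest).take ((a :: b :: rest).length / 2)).any (fun p => decide (p.1 > p.2.2.2)) = true
        · rw [if_pos hL, if_pos (show ((a :: b :: rest).any fun p => decide (p.1 > p.2.2.2)) = true by
            rw [hany, hL]; exact Bool.true_or _)]
        · by_cases hR : ((a :: b :: rest).drop ((a :: b :: rest).length / 2)).any (fun p => decide (p.1 > p.2.2.2)) = true
          · rw [if_neg hL, if_pos hR, if_pos (show ((a :: b :: rest).any fun p => decide (p.1 > p.2.2.2)) = true by
              rw [hany, hR, Bool.or_true])]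
          · rw [if_neg hL, if_neg hR, if_neg (show ¬ ((a :: b :: rest).any fun p => decide (p.1 > p.2.2.2)) = true by
              rw [hany, Bool.eq_false_iff.mpr hL, Bool.eq_false_iff.mpr hR]; exact Bool.false_ne_true)]
            have hmap : ∀ (f : (Int × Int × Int × Int) → Int),
                (((a :: b :: rest).take ((a :: b :: rest).length / 2)).map f).sum
                  + (((a :: b :: rest).drop ((a :: b :: rest).length / 2)).map f).sum
                  = ((a :: b :: rest).map f).sum := by
              intro f
              conv_rhs => rw [← hsplit]
              rw [List.map_append, List.sum_append]
            show some _ = some _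
            rw [Option.some_inj, Prod.mk.injEq]
            exact ⟨hmap _, hmap _⟩

theorem fitB_totals_spec (ps : List (Int × Int × Int × Int)) :
    fitB_totals ps =
      (if ps.any (fun p => p.1 > p.2.2.2) then none
       else some ((ps.map (fun p => p.2.1 * p.1)).sum, (ps.map (fun p => p.2.2.1 * p.1)).sum)) :=
  fitB_totals_spec_aux ps.length ps le_rfl

-- Invariant of A's loop, phrased over the tail of `items` that the index reaches.
theorem fitA_loop_spec (W : Int) :
    ∀ (sol : List Int) (items : List (Int × Int × Int)) (i : Nat)
      (tv tw : Int), sol.length + i ≤ items.length →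
    fitA_loop items W sol i tv tw =
      (let pairs := sol.zip (items.drop i)
       if pairs.any (fun p => p.1 > p.2.2.2) then 0
       else if tw + (pairs.map (fun p => p.2.2.1 * p.1)).sum ≤ W then
         -(tv + (pairs.map (fun p => p.2.1 * p.1)).sum) else 0) := by
  intro sol
  induction sol with
  | nil => intro items i tv tw _; simp [fitA_loop]
  | cons c rest ih =>
      intro items i tv tw h
      simp only [List.length_cons] at h
      have hi : i < items.length := by omega
      have hget : PySem.List.pyGet? items (i : Int) = some items[i] := by
        simpa using PySem.List.pyGet?_natCast (xs := items) (i := i) hi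
      have hdrop : items.drop i = items[i] :: items.drop (i + 1) :=
        List.drop_eq_getElem_cons hi
      simp only [fitA_loop, hget, hdrop, List.zip_cons_cons]
      by_cases hc : c > items[i].2.2
      · simp [hc]
      · have := ih items (i + 1) (tv + items[i].1 * c) (tw + items[i].2.1 * c) (by omega)
        simp only [this, hc]
        simp only [List.any_cons, List.map_cons, List.sum_cons]
        have : ¬ decide (c > items[i].2.2) = true := by simpa using hc
        simp only [this, Bool.false_or, if_false]
        simp only [add_assoc]

-- If some zipped pair violates its bound, A's loop returns 0 (it reaches the first
-- violation before any out-of-range index, since zipped indices are in range).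
theorem fitA_loop_viol (W : Int) :
    ∀ (sol : List Int) (items : List (Int × Int × Int)) (i : Nat) (tv tw : Int),
    ((sol.zip (items.drop i)).any (fun p => p.1 > p.2.2.2)) = true →
    fitA_loop items W sol i tv tw = 0 := by
  intro sol
  induction sol with
  | nil => intro items i tv tw h; simp at h
  | cons c rest ih =>
      intro items i tv tw h
      have hi : i < items.length := by
        by_contra hge
        rw [List.drop_eq_nil_of_le (by omega)] at h
        simp at h
      have hget : PySem.List.pyGet? items (i : Int) = some items[i] := by
        simpa using PySem.List.pyGet?_natCast (xs := items) (i := i) hi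
      rw [List.drop_eq_getElem_cons hi, List.zip_cons_cons, List.any_cons] at h
      simp only [fitA_loop, hget]
      by_cases hc : c > items[i].2.2
      · simp [hc]
      · rw [show decide (c > items[i].2.2) = false by simpa using hc, Bool.false_or] at h
        simp only [hc, if_false]
        exact ih items (i + 1) _ _ h

-- ===== VERDICT (by name: the statements are the Claim_ definitions above) =====
theorem fit_bounded_knapsack_spec : Claim_equal_fit_bounded_knapsack := by
  intro solution items W _ hpre
  unfold Spec_fit_bounded_knapsack fit_bounded_knapsack fit_bounded_knapsack_alt
  simp only [fitB_totals_spec]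
  by_cases hv : (solution.zip items).any (fun p => p.1 > p.2.2.2)
  · have hA := fitA_loop_viol W solution items 0 0 0 (by simpa using hv)
    simp [hA, hv]
  · rcases hpre with hlen | hviol
    · have := fitA_loop_spec W solution items 0 0 0 (by simpa using hlen)
      simp only [List.drop_zero] at this
      simp only [this, hv, if_false, zero_add, Bool.false_eq_true]
      split_ifs with h1 h2 h2 <;> omega
    · exact absurd hviol hv
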